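-- pv_equiv track=rewrite | github.com/drkplaya777/bctci | binary search/find_valley_bottom.py | find_bottom
-- ===== SOURCE A (Python) =====
-- def is_before(midpoint, value_after):
--     return midpoint < value_after
--
-- def find_bottom(arr):
--     left, right = 0, len(arr) - 1
--
--     while right - left > 1:
--         mid = (left + right) // 2
--
--         if is_before(arr[mid], arr[mid + 1]):
--             right = mid
--         else:
--             left = mid
--
--     if arr[left] < arr[right]:
--         return arr[left]
--     return arr[right]
-- ===== SOURCE B (Python) =====
-- def find_bottom(arr):
--     if len(arr) <= 2:
--         return min(arr)
--     m = (len(arr) - 1) // 2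
--     if arr[m] < arr[m + 1]:
--         return find_bottom(arr[:m + 1])
--     return find_bottom(arr[m:])
-- ===== Notes on version B (the rewrite author's own statement) =====
-- stated objective: alternative
-- what changed: Replaced A's iterative two-index binary-search loop with a divide-and-conquer recursion on list slices whose base case is min() of the remaining <=2-element window.
import Mathlib
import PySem

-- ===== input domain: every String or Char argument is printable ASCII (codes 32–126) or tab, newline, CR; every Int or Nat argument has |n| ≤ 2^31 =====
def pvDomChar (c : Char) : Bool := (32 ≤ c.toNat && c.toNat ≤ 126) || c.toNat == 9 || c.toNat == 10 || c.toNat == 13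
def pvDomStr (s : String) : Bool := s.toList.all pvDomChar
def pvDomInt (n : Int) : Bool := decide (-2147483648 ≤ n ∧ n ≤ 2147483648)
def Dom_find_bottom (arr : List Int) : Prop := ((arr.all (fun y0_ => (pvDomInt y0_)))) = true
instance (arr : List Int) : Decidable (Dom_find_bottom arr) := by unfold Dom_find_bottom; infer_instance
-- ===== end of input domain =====

-- B replaces A's iterative two-index binary-search loop with a divide-and-conquer
-- recursion on list slices, ending in min() on a window of ≤ 2 elements (objective:
-- alternative decomposition; return values proved equal on all nonempty lists).

-- ===== PORT A =====
-- A's while loop: state (left, right) narrowed until right - left <= 1; the loop runs at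
-- most len(arr) times, so a fuel of arr.length makes the recursion structural (fuel is a
-- totality guard only, never reached while right - left > 1).
def find_bottom_loop (arr : List Int) (left right : Int) : Nat → Int
  | 0 =>
    if PySem.List.pyGetD arr left 0 < PySem.List.pyGetD arr right 0 then
      PySem.List.pyGetD arr left 0
    else
      PySem.List.pyGetD arr right 0
  | fuel + 1 =>
    if right - left > 1 then
      -- mid = (left + right) // 2, inlined
      if PySem.List.pyGetD arr (PySem.Int.floordiv (left + right) 2) 0 <
          PySem.List.pyGetD arr (PySem.Int.floordiv (left + right) 2 + 1) 0 then
        find_bottom_loop arr left (PySem.Int.floordiv (left + right) 2) fuel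
      else
        find_bottom_loop arr (PySem.Int.floordiv (left + right) 2) right fuel
    else
      if PySem.List.pyGetD arr left 0 < PySem.List.pyGetD arr right 0 then
        PySem.List.pyGetD arr left 0
      else
        PySem.List.pyGetD arr right 0

def find_bottom (arr : List Int) : Int :=
  find_bottom_loop arr 0 ((arr.length : Int) - 1) arr.length

-- ===== PORT B =====
-- B: recursion on slices, base case min() of the <=2-element window; each recursive call
-- shrinks the list, so a fuel of arr.length makes the recursion structural.
def find_bottom_alt_rec (arr : List Int) : Nat → Int
  | 0 => (PySem.List.min? arr (fun x => x)).getD 0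
  | fuel + 1 =>
    if arr.length ≤ 2 then
      (PySem.List.min? arr (fun x => x)).getD 0
    else
      -- m = (len(arr) - 1) // 2, inlined
      if PySem.List.pyGetD arr (PySem.Int.floordiv ((arr.length : Int) - 1) 2) 0 <
          PySem.List.pyGetD arr (PySem.Int.floordiv ((arr.length : Int) - 1) 2 + 1) 0 then
        find_bottom_alt_rec (PySem.List.slice arr none (some (PySem.Int.floordiv ((arr.length : Int) - 1) 2 + 1))) fuel
      else
        find_bottom_alt_rec (PySem.List.slice arr (some (PySem.Int.floordiv ((arr.length : Int) - 1) 2))) fuel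

def find_bottom_alt (arr : List Int) : Int :=
  find_bottom_alt_rec arr arr.length

-- ===== PRECONDITION & SPEC =====
-- Pre_ excludes only the empty list, on which Python A raises IndexError (arr[0]) and B raises ValueError (min([])).
def Pre_find_bottom (arr : List Int) : Prop := arr ≠ []
instance (arr : List Int) : Decidable (Pre_find_bottom arr) := by unfold Pre_find_bottom; infer_instance
def pvWitness_find_bottom : List Int := [3, 1, 2]

def Spec_find_bottom (arr : List Int) (out : Int) : Prop := out = find_bottom_alt arr
instance (arr : List Int) (out : Int) : Decidable (Spec_find_bottom arr out) := by unfold Spec_find_bottom; infer_instance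

-- ===== CLAIM (what is proved, stated in full; the proofs are below) =====
def Claim_equal_find_bottom : Prop := ∀ (arr : List Int), Dom_find_bottom arr → Pre_find_bottom arr → Spec_find_bottom arr (find_bottom arr)

-- ===== LEMMAS AND PROOFS =====

-- pyGetD of the window [l, l + t) at an in-range offset i reads arr[l + i]
theorem getD_window (arr : List Int) (l : Int) (h0 : 0 ≤ l) (i : Int) (hi : 0 ≤ i)
    (hin : l + i < (arr.length : Int)) (t : Nat) (hit : i.toNat < t) :
    PySem.List.pyGetD ((arr.drop l.toNat).take t) i 0 = PySem.List.pyGetD arr (l + i) 0 := by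
  have hlen : ((arr.drop l.toNat).take t).length = min t (arr.length - l.toNat) := by simp
  rw [PySem.List.pyGetD_eq_getElem _ _ hi (by rw [hlen]; push_cast; omega),
      PySem.List.pyGetD_eq_getElem _ _ (by omega) (by omega)]
  rw [List.getElem_take, List.getElem_drop]
  congr 1
  omega

-- the window [l, l] is the one-element list [arr[l]]
theorem window_one (arr : List Int) (r : Int) (h0 : 0 ≤ r) (hr : r < (arr.length : Int)) :
    ((arr.drop r.toNat).take ((r - r).toNat + 1)) = [PySem.List.pyGetD arr r 0] := by
  have e0 : (r - r).toNat + 1 = 1 := by omega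
  rw [e0, List.take_one, List.head?_drop, List.getElem?_eq_getElem (by omega),
      PySem.List.pyGetD_eq_getElem _ _ (by omega) (by omega)]
  rfl

-- on a list of at most two elements, B's recursion returns min() for every fuel
theorem alt_rec_small (w : List Int) (fb : Nat) (hw : w.length ≤ 2) :
    find_bottom_alt_rec w fb = (PySem.List.min? w (fun x => x)).getD 0 := by
  cases fb with
  | zero => rfl
  | succ fb => rw [find_bottom_alt_rec, if_pos hw]

theorem loop_eq_alt (arr : List Int) (n : Nat) (l r : Int) (h0 : 0 ≤ l) (hlr : l ≤ r)
    (hr : r < (arr.length : Int)) (hn : (r - l).toNat ≤ n) (fb : Nat)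
    (hfb : (r - l).toNat + 1 ≤ fb) :
    find_bottom_loop arr l r n
      = find_bottom_alt_rec ((arr.drop l.toNat).take ((r - l).toNat + 1)) fb := by
  have hwl : ((arr.drop l.toNat).take ((r - l).toNat + 1)).length = (r - l).toNat + 1 := by
    simp; omega
  induction n generalizing l r fb with
  | zero =>
    -- r = l : both sides are arr[l]
    have hrl : r = l := by omega
    subst hrl
    rw [find_bottom_loop, alt_rec_small _ _ (by omega), window_one arr r (by omega) hr]
    simp [PySem.List.min?_id_cons]
  | succ n ih =>
    by_cases hgt : r - l > 1
    · -- narrowing step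
      have hmid : PySem.Int.floordiv (l + r) 2 = (l + r) / 2 :=
        PySem.Int.floordiv_eq_ediv_of_pos (by omega)
      set mid := (l + r) / 2 with hmiddef
      have hb1 : l < mid := by omega
      have hb2 : mid < r := by omega
      obtain ⟨fb', rfl⟩ : ∃ fb', fb = fb' + 1 := ⟨fb - 1, by omega⟩
      rw [find_bottom_loop, if_pos hgt, hmid, find_bottom_alt_rec,
          if_neg (show ¬(((arr.drop l.toNat).take ((r - l).toNat + 1)).length ≤ 2) from by
            rw [hwl]; omega)]
      have hml : PySem.Int.floordiv ((((arr.drop l.toNat).take ((r - l).toNat + 1)).length : Int) - 1) 2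
          = mid - l := by
        rw [hwl]
        rw [PySem.Int.floordiv_eq_ediv_of_pos (by omega)]
        push_cast
        omega
      rw [hml]
      have hg1 : PySem.List.pyGetD ((arr.drop l.toNat).take ((r - l).toNat + 1)) (mid - l) 0
          = PySem.List.pyGetD arr mid 0 := by
        have := getD_window arr l h0 (mid - l) (by omega) (by omega) ((r - l).toNat + 1) (by omega)
        simpa using this
      have hg2 : PySem.List.pyGetD ((arr.drop l.toNat).take ((r - l).toNat + 1)) (mid - l + 1) 0
          = PySem.List.pyGetD arr (mid + 1) 0 := by
        have := getD_window arr l h0 (mid - l + 1) (by omega) (by omega) ((r - l).toNat + 1) (by omega)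
        have e : l + (mid - l + 1) = mid + 1 := by omega
        rw [e] at this
        exact this
      rw [hg1, hg2]
      by_cases hc : PySem.List.pyGetD arr mid 0 < PySem.List.pyGetD arr (mid + 1) 0
      · rw [if_pos hc, if_pos hc]
        rw [PySem.List.slice_to _ (by omega), List.take_take]
        have e : min (mid - l + 1).toNat ((r - l).toNat + 1) = (mid - l).toNat + 1 := by omega
        rw [e]
        exact ih l mid h0 (by omega) (by omega) (by omega) fb' (by omega) (by simp; omega)
      · rw [if_neg hc, if_neg hc]
        rw [PySem.List.slice_from _ (by omega), List.drop_take, List.drop_drop]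
        have e1 : (r - l).toNat + 1 - (mid - l).toNat = (r - mid).toNat + 1 := by omega
        have e2 : l.toNat + (mid - l).toNat = mid.toNat := by omega
        rw [e1, e2]
        exact ih mid r (by omega) (by omega) (by omega) (by omega) fb' (by omega) (by simp; omega)
    · -- base: right - left <= 1
      rw [find_bottom_loop, if_neg hgt, alt_rec_small _ _ (by rw [hwl]; omega)]
      by_cases hrl : r = l
      · subst hrl
        rw [window_one arr r (by omega) hr]
        simp [PySem.List.min?_id_cons]
      · -- r = l + 1 : window is the two-element list [arr[l], arr[r]]
        have hr1 : r = l + 1 := by omega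
        have hw : ((arr.drop l.toNat).take ((r - l).toNat + 1))
            = [PySem.List.pyGetD arr l 0, PySem.List.pyGetD arr r 0] := by
          rw [List.drop_eq_getElem_cons (show l.toNat < arr.length by omega)]
          have e : (r - l).toNat + 1 = 2 := by omega
          rw [e, List.take_succ_cons]
          rw [List.drop_eq_getElem_cons (show l.toNat + 1 < arr.length by omega)]
          rw [List.take_succ_cons, List.take_zero]
          rw [PySem.List.pyGetD_eq_getElem _ _ (by omega) (by omega),
              PySem.List.pyGetD_eq_getElem _ _ (by omega) (by omega)]
          simp only [show l.toNat + 1 = r.toNat from by omega]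
        rw [hw, PySem.List.min?_id_cons]
        simp only [List.foldl_cons, List.foldl_nil, Option.getD_some]
        rcases lt_or_ge (PySem.List.pyGetD arr l 0) (PySem.List.pyGetD arr r 0) with h | h
        · rw [if_pos h]; exact (min_eq_left h.le).symm
        · rw [if_neg (not_lt.mpr h)]; exact (min_eq_right h).symm

-- ===== VERDICT (by name: the statement is the Claim_ definition above) =====
theorem find_bottom_spec : Claim_equal_find_bottom := by
  intro arr _ hpre
  unfold Spec_find_bottom find_bottom find_bottom_alt
  have hlen : 0 < arr.length := List.length_pos_iff.mpr hpre
  have h := loop_eq_alt arr arr.length 0 ((arr.length : Int) - 1) (by omega) (by omega)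
    (by omega) (by omega) arr.length (by omega)
  have e : (((arr.length : Int) - 1 - 0).toNat + 1) = arr.length := by omega
  rw [e] at h
  simpa using h
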